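-- pv_equiv track=rewrite | github.com/NVIDIA/NeMo | nemo/collections/nlp/data/dialogue/data_processor/assistant_data_processor.py | get_continuous_slots
-- ===== SOURCE A (Python) =====
-- def get_continuous_slots(slot_ids, empty_slot_id, bio_slot_ids_to_unified_slot_ids):
--     """
--     Extract continuous spans of slot_ids
--
--     To accomodate slots with distinct labels for B-label1 and I-label1,
--     slot_id = self.bio_slot_ids_to_unified_slot_ids[slot_id] is called to map them both to label1
--
--     Args:
--         Slot: list of int representing slot of each word token
--         For instance, 54 54 54 54 54 54 54 54 18 54 44 44 54 46 46 54 12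
--         Corresponds to "please set an alarm clock for my next meeting with the team at three pm next friday"
--         Except for the empty_slot_id (54 in this case), we hope to extract the continuous spans of tokens,
--         each containing a start position and an exclusive end position
--         E.g {18: [9, 10], 44: [11, 13], 46: [14, 16], 12: [17, 18]}
--     """
--     slot_id_stack = []
--     position_stack = []
--     for i in range(len(slot_ids)):
--         slot_id = slot_ids[i]
--
--         slot_id = bio_slot_ids_to_unified_slot_ids[slot_id]
--
--         if not slot_id_stack or slot_id != slot_id_stack[-1]:
--             slot_id_stack.append(slot_id)
--             position_stack.append([])
--         position_stack[-1].append(i)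
--
--     slot_id_to_start_and_exclusive_end = {
--         slot_id_stack[i]: [position_stack[i][0], position_stack[i][-1] + 1]
--         for i in range(len(position_stack))
--         if slot_id_stack[i] != empty_slot_id
--     }
--
--     return slot_id_to_start_and_exclusive_end
-- ===== SOURCE B (Python) =====
-- def get_continuous_slots(slot_ids, empty_slot_id, bio_slot_ids_to_unified_slot_ids):
--     """Single pass keeping only the current run's unified slot id and start index."""
--     result = {}
--     cur = None
--     start = 0
--     for i, sid in enumerate(slot_ids):
--         u = bio_slot_ids_to_unified_slot_ids[sid]
--         if cur is None:
--             cur, start = u, i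
--         elif u != cur:
--             if cur != empty_slot_id:
--                 result[cur] = [start, i]
--             cur, start = u, i
--     if cur is not None and cur != empty_slot_id:
--         result[cur] = [start, len(slot_ids)]
--     return result
-- ===== Notes on version B (the rewrite author's own statement) =====
-- stated objective: simpler
-- what changed: Replaced A's two parallel run stacks plus a final dict comprehension by a single pass that keeps only the current run's unified slot id and start index, writing each closed run into the result dict as it ends.
import Mathlib
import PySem

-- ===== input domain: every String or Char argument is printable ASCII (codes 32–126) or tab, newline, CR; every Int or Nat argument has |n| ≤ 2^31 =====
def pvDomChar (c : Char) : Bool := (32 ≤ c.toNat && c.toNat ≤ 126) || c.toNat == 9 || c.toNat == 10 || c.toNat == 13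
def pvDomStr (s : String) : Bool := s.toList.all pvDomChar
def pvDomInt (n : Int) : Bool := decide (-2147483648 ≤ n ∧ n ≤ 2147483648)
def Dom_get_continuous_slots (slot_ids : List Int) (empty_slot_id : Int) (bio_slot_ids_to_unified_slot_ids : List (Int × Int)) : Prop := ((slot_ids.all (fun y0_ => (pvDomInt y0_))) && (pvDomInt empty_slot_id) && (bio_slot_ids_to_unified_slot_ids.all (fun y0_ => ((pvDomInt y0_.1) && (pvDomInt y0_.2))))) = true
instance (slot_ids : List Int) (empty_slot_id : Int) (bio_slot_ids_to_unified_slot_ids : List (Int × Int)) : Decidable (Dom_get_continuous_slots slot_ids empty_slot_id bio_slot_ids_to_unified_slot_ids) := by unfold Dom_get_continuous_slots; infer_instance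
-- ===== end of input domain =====

-- B replaces A's two parallel run stacks + final dict comprehension by a single pass that keeps
-- only the current run's unified id and start index (objective: simpler).

-- shared by both ports: dict lookup bio_slot_ids_to_unified_slot_ids[slot_id]; Python raises
-- KeyError when the key is absent (PySem.Dict.get? = none there) — excluded by Pre_, so the
-- .getD 0 default is never reached on admitted inputs.
def gcsMap (bio : List (Int × Int)) (s : Int) : Int :=
  ((PySem.Dict.mk bio).get? s).getD 0

-- ===== PORT A =====
-- loop body: push a new run when the stack is empty or the unified id changed, then append i
-- to the last position list (position_stack[-1].append(i))
def gcsStepA (bio : List (Int × Int)) (st : List Int × List (List Int)) (pr : Int × Int) :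
    List Int × List (List Int) :=
  let u := gcsMap bio pr.2
  if st.1 = [] ∨ PySem.List.pyGet? st.1 (-1) ≠ some u then
    (st.1 ++ [u], st.2 ++ [[pr.1]])
  else
    (st.1, st.2.dropLast ++ [st.2.getLastD [] ++ [pr.1]])

-- one entry of the final dict comprehension: {slot_id_stack[i]: [position_stack[i][0], position_stack[i][-1] + 1] …}
def gcsEntry (empty_slot_id : Int) (d : PySem.Dict Int (List Int)) (cp : Int × List Int) :
    PySem.Dict Int (List Int) :=
  if cp.1 ≠ empty_slot_id then
    d.insert cp.1 [PySem.List.pyGetD cp.2 0 0, PySem.List.pyGetD cp.2 (-1) 0 + 1]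
  else d

def get_continuous_slots (slot_ids : List Int) (empty_slot_id : Int) (bio_slot_ids_to_unified_slot_ids : List (Int × Int)) : List (Int × List Int) :=
  let st := (PySem.List.enumerate slot_ids 0).foldl (gcsStepA bio_slot_ids_to_unified_slot_ids) ([], [])
  ((st.1.zip st.2).foldl (gcsEntry empty_slot_id) PySem.Dict.empty).items

-- ===== PORT B =====
-- B's state: (result dict, current run's unified id — none before the first token, run start index)
def gcsStepB (empty_slot_id : Int) (bio : List (Int × Int))
    (st : PySem.Dict Int (List Int) × Option Int × Int) (pr : Int × Int) :
    PySem.Dict Int (List Int) × Option Int × Int :=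
  let u := gcsMap bio pr.2
  match st.2.1 with
  | none => (st.1, some u, pr.1)
  | some c =>
    if u ≠ c then
      ((if c ≠ empty_slot_id then st.1.insert c [st.2.2, pr.1] else st.1), some u, pr.1)
    else st

-- after the loop: close the final run with exclusive end = len(slot_ids)
def gcsClose (empty_slot_id : Int) (n : Int)
    (st : PySem.Dict Int (List Int) × Option Int × Int) : PySem.Dict Int (List Int) :=
  match st.2.1 with
  | none => st.1
  | some c => if c ≠ empty_slot_id then st.1.insert c [st.2.2, n] else st.1

def get_continuous_slots_alt (slot_ids : List Int) (empty_slot_id : Int) (bio_slot_ids_to_unified_slot_ids : List (Int × Int)) : List (Int × List Int) :=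
  (gcsClose empty_slot_id (slot_ids.length : Int)
    ((PySem.List.enumerate slot_ids 0).foldl (gcsStepB empty_slot_id bio_slot_ids_to_unified_slot_ids)
      (PySem.Dict.empty, none, 0))).items

-- ===== PRECONDITION & SPEC =====
-- Pre_ excludes exactly the inputs on which Python A raises KeyError: some slot id is not a key
-- of bio_slot_ids_to_unified_slot_ids.
def Pre_get_continuous_slots (slot_ids : List Int) (empty_slot_id : Int) (bio_slot_ids_to_unified_slot_ids : List (Int × Int)) : Prop :=
  ∀ s ∈ slot_ids, s ∈ bio_slot_ids_to_unified_slot_ids.map Prod.fst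
instance (slot_ids : List Int) (empty_slot_id : Int) (bio_slot_ids_to_unified_slot_ids : List (Int × Int)) : Decidable (Pre_get_continuous_slots slot_ids empty_slot_id bio_slot_ids_to_unified_slot_ids) := by unfold Pre_get_continuous_slots; infer_instance

def pvWitness_get_continuous_slots : List Int × Int × (List (Int × Int)) :=
  ([5, 5, 1, 2, 2, 5, 1], 9, [(5, 9), (1, 18), (2, 44)])

def Spec_get_continuous_slots (slot_ids : List Int) (empty_slot_id : Int) (bio_slot_ids_to_unified_slot_ids : List (Int × Int)) (out : List (Int × List Int)) : Prop := out = get_continuous_slots_alt slot_ids empty_slot_id bio_slot_ids_to_unified_slot_ids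
instance (slot_ids : List Int) (empty_slot_id : Int) (bio_slot_ids_to_unified_slot_ids : List (Int × Int)) (out : List (Int × List Int)) : Decidable (Spec_get_continuous_slots slot_ids empty_slot_id bio_slot_ids_to_unified_slot_ids out) := by unfold Spec_get_continuous_slots; infer_instance

-- ===== CLAIM (what is proved, stated in full; the proofs are below) =====
def Claim_equal_get_continuous_slots : Prop := ∀ (slot_ids : List Int) (empty_slot_id : Int) (bio_slot_ids_to_unified_slot_ids : List (Int × Int)), Dom_get_continuous_slots slot_ids empty_slot_id bio_slot_ids_to_unified_slot_ids → Pre_get_continuous_slots slot_ids empty_slot_id bio_slot_ids_to_unified_slot_ids → Spec_get_continuous_slots slot_ids empty_slot_id bio_slot_ids_to_unified_slot_ids (get_continuous_slots slot_ids empty_slot_id bio_slot_ids_to_unified_slot_ids)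

-- ===== LEMMAS AND PROOFS =====

-- Core invariant: with the loops started mid-run — A holding finished runs (ss, ps) plus the open
-- run (c, p), B holding the dict d already built from (ss, ps) plus (cur = c, start) — the two
-- finished values coincide.  p's first element is start and its last is i - 1.
theorem gcs_agree (E : Int) (bio : List (Int × Int)) :
    ∀ (l : List Int) (i c start : Int) (ss : List Int) (ps : List (List Int)) (p : List Int)
      (d : PySem.Dict Int (List Int)),
    ss.length = ps.length → p ≠ [] →
    PySem.List.pyGetD p 0 0 = start → PySem.List.pyGetD p (-1) 0 = i - 1 →
    d = (ss.zip ps).foldl (gcsEntry E) PySem.Dict.empty →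
    (let st := (PySem.List.enumerate l i).foldl (gcsStepA bio) (ss ++ [c], ps ++ [p])
     (st.1.zip st.2).foldl (gcsEntry E) PySem.Dict.empty)
    = gcsClose E (i + l.length) ((PySem.List.enumerate l i).foldl (gcsStepB E bio) (d, some c, start)) := by
  intro l
  induction l with
  | nil =>
    intro i c start ss ps p d hlen hp hhead hlast hd
    simp only [PySem.List.enumerate_nil, List.foldl_nil, List.length_nil]
    rw [List.zip_append hlen, List.foldl_append, ← hd]
    simp only [List.zip_cons_cons, List.zip_nil_right, List.foldl_cons, List.foldl_nil]
    simp only [gcsEntry, gcsClose, hhead, hlast]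
    have : i - 1 + 1 = i + (0 : Nat) := by omega
    rw [this]
  | cons s rest ih =>
    intro i c start ss ps p d hlen hp hhead hlast hd
    rw [PySem.List.enumerate_cons]
    simp only [List.foldl_cons]
    by_cases hc : gcsMap bio s = c
    · -- same unified id: A extends the last position list, B's state is unchanged
      have hA : gcsStepA bio (ss ++ [c], ps ++ [p]) (i, s) = (ss ++ [c], ps ++ [p ++ [i]]) := by
        simp only [gcsStepA, hc, PySem.List.pyGet?_neg_one_append_singleton]
        simp
      have hB : gcsStepB E bio (d, some c, start) (i, s) = (d, some c, start) := by
        simp [gcsStepB, hc]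
      rw [hA, hB]
      have hhead' : PySem.List.pyGetD (p ++ [i]) 0 0 = start := by
        cases p with
        | nil => exact absurd rfl hp
        | cons a t => simpa [PySem.List.pyGetD_zero] using hhead
      have := ih (i + 1) c start ss ps (p ++ [i]) d hlen (by simp) hhead'
        (by rw [PySem.List.pyGetD_neg_one_append_singleton]; omega) hd
      rw [this]
      have : i + ((rest.length : Int) + 1) = i + 1 + (rest.length : Int) := by ring
      simp only [List.length_cons]
      push_cast
      rw [this]
    · -- new unified id: A pushes a fresh run, B closes (c, [start, i]) into the dict
      have hA : gcsStepA bio (ss ++ [c], ps ++ [p]) (i, s)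
          = ((ss ++ [c]) ++ [gcsMap bio s], (ps ++ [p]) ++ [[i]]) := by
        simp only [gcsStepA, PySem.List.pyGet?_neg_one_append_singleton]
        simp [Ne.symm hc]
      have hB : gcsStepB E bio (d, some c, start) (i, s)
          = ((if c ≠ E then d.insert c [start, i] else d), some (gcsMap bio s), i) := by
        simp [gcsStepB, hc]
      rw [hA, hB]
      have hd' : (if c ≠ E then d.insert c [start, i] else d)
          = ((ss ++ [c]).zip (ps ++ [p])).foldl (gcsEntry E) PySem.Dict.empty := by
        rw [List.zip_append hlen, List.foldl_append, ← hd]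
        simp only [List.zip_cons_cons, List.zip_nil_right, List.foldl_cons, List.foldl_nil]
        simp only [gcsEntry, hhead, hlast]
        have : i - 1 + 1 = i := by omega
        rw [this]
      have := ih (i + 1) (gcsMap bio s) i (ss ++ [c]) (ps ++ [p]) [i]
        (if c ≠ E then d.insert c [start, i] else d)
        (by simp [hlen]) (by simp) (by simp [pysem])
        (by simp [pysem]) hd'
      rw [this]
      have : i + ((rest.length : Int) + 1) = i + 1 + (rest.length : Int) := by ring
      simp only [List.length_cons]
      push_cast
      rw [this]

-- ===== VERDICT (by name: the statement is the Claim_ definition above) =====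
theorem get_continuous_slots_spec : Claim_equal_get_continuous_slots := by
  intro slot_ids empty_slot_id bio _ _
  unfold Spec_get_continuous_slots
  cases slot_ids with
  | nil => rfl
  | cons s rest =>
    unfold get_continuous_slots get_continuous_slots_alt
    rw [PySem.List.enumerate_cons]
    simp only [List.foldl_cons]
    have hA : gcsStepA bio ([], []) (0, s) = ([] ++ [gcsMap bio s], [] ++ [[(0 : Int)]]) := by
      simp [gcsStepA]
    have hB : gcsStepB empty_slot_id bio (PySem.Dict.empty, none, 0) (0, s)
        = (PySem.Dict.empty, some (gcsMap bio s), 0) := by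
      simp [gcsStepB]
    rw [hA, hB]
    have := gcs_agree empty_slot_id bio rest 1 (gcsMap bio s) 0 [] [] [0] PySem.Dict.empty
      rfl (by simp) (by simp [pysem]) (by simp [pysem]) rfl
    simp only at this
    simp only [zero_add]
    rw [this]
    have : (1 : Int) + (rest.length : Int) = ((s :: rest).length : Int) := by
      simp only [List.length_cons]; push_cast; ring
    rw [this]
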